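-- pv_equiv track=rewrite | github.com/shan0ar/crawler | crawler.py | should_ignore_listing
-- ===== SOURCE A (Python) =====
-- def should_ignore_listing(url):
--     IGNORE = [
--         '/logout', '/deconnexion', '/logoff', '/signout', '/disconnect',
--         '/log-out', '/user/logout'
--     ]
--     for ign in IGNORE:
--         if ign in url:
--             return True
--     return False
-- ===== SOURCE B (Python) =====
-- def should_ignore_listing(url):
--     IGNORE = ('/logout', '/deconnexion', '/logoff', '/signout', '/disconnect',
--               '/log-out', '/user/logout')
--     for i in range(len(url)):
--         if url.startswith(IGNORE, i):
--             return True
--     return False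
-- ===== Notes on version B (the rewrite author's own statement) =====
-- stated objective: alternative
-- what changed: Instead of scanning the URL once per ignore-substring ('ign in url' for each of the 7 literals), B makes a single left-to-right pass over the URL positions and at each position asks whether any of the literals starts there (tuple form of str.startswith).
import Mathlib
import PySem

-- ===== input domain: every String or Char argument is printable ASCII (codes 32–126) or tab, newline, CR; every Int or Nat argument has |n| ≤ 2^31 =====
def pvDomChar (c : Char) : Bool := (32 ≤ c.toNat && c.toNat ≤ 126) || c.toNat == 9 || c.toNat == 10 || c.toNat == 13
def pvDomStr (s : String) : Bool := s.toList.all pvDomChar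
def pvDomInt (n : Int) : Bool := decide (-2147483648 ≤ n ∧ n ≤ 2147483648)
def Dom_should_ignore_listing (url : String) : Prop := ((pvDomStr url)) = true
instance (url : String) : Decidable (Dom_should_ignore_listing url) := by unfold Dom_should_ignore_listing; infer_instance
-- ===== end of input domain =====

-- B makes a single pass over the URL positions, asking at each position whether any of the
-- seven ignore-literals starts there, instead of A's one full substring scan per literal.

-- ===== PORT A =====
def pvIgnoreList : List String :=
  ["/logout", "/deconnexion", "/logoff", "/signout", "/disconnect", "/log-out", "/user/logout"]

-- the 'for ign in IGNORE: if ign in url: return True' loop, with early return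
def pvALoop (igns : List String) (url : String) : Bool :=
  match igns with
  | [] => false
  | ign :: rest => if PySem.Str.isIn ign url then true else pvALoop rest url

def should_ignore_listing (url : String) : Bool :=
  pvALoop pvIgnoreList url

-- ===== PORT B =====
def pvIgnoreTuple : List (List Char) :=
  ["/logout".toList, "/deconnexion".toList, "/logoff".toList, "/signout".toList,
   "/disconnect".toList, "/log-out".toList, "/user/logout".toList]

-- the 'for i in range(len(url)): if url.startswith(IGNORE, i): return True' loop;
-- position i is represented by the suffix url.toList.drop i (startswith at i = startswith of the suffix)
def pvBScan (cs : List Char) : Bool :=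
  match cs with
  | [] => false
  | _ :: rest =>
    if pvIgnoreTuple.any (fun p => PySem.Chars.startswith cs p) then true else pvBScan rest

def should_ignore_listing_alt (url : String) : Bool :=
  pvBScan url.toList

-- ===== PRECONDITION & SPEC =====
def Spec_should_ignore_listing (url : String) (out : Bool) : Prop := out = should_ignore_listing_alt url
instance (url : String) (out : Bool) : Decidable (Spec_should_ignore_listing url out) := by unfold Spec_should_ignore_listing; infer_instance

-- ===== CLAIM (what is proved, stated in full; the proofs are below) =====
def Claim_equal_should_ignore_listing : Prop := ∀ (url : String), Dom_should_ignore_listing url → Spec_should_ignore_listing url (should_ignore_listing url)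

-- ===== LEMMAS AND PROOFS =====

theorem pvALoop_eq_any (igns : List String) (url : String) :
    pvALoop igns url = igns.any (fun ign => PySem.Str.isIn ign url) := by
  induction igns with
  | nil => rfl
  | cons i rest ih =>
    simp only [pvALoop, List.any_cons, ih]
    cases PySem.Str.isIn i url <;> simp

theorem pvBScan_eq_any (cs : List Char) :
    pvBScan cs = pvIgnoreTuple.any (fun p => PySem.Chars.isIn p cs) := by
  induction cs with
  | nil => decide
  | cons c rest ih =>
    show (if _ then true else pvBScan rest) = _
    rw [ih]
    by_cases h : pvIgnoreTuple.any (fun p => PySem.Chars.startswith (c :: rest) p) = true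
    · rw [if_pos h]
      rcases List.any_eq_true.mp h with ⟨p, hp, hsw⟩
      have : PySem.Chars.isIn p (c :: rest) = true := by
        rw [PySem.Chars.isIn_iff_infix]
        exact (PySem.Chars.startswith_iff _ _ |>.mp hsw).isInfix
      exact (List.any_eq_true.mpr ⟨p, hp, this⟩).symm
    · rw [if_neg h]
      apply Bool.eq_iff_iff.mpr
      simp only [List.any_eq_true]
      constructor
      · rintro ⟨p, hp, hin⟩
        exact ⟨p, hp, by
          rw [PySem.Chars.isIn_iff_infix] at hin ⊢
          exact hin.trans (List.suffix_cons c rest).isInfix⟩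
      · rintro ⟨p, hp, hin⟩
        rw [PySem.Chars.isIn_iff_infix, List.infix_cons_iff] at hin
        rcases hin with hpre | hinf
        · exact absurd (List.any_eq_true.mpr ⟨p, hp, (PySem.Chars.startswith_iff _ _).mpr hpre⟩) h
        · exact ⟨p, hp, (PySem.Chars.isIn_iff_infix _ _).mpr hinf⟩

-- ===== VERDICT (by name: the statement is the Claim_ definition above) =====
theorem should_ignore_listing_spec : Claim_equal_should_ignore_listing := by
  intro url _
  show should_ignore_listing url = should_ignore_listing_alt url
  unfold should_ignore_listing should_ignore_listing_alt
  rw [pvALoop_eq_any, pvBScan_eq_any]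
  simp [pvIgnoreList, pvIgnoreTuple, PySem.Str.isIn]
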